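-- pv_equiv track=rewrite | github.com/lokeshsk1/LeetHub | 3803-count-residue-prefixes/3803-count-residue-prefixes.py | residuePrefixes
-- ===== SOURCE A (Python) =====
-- def residuePrefixes(s: str) -> int:
--
--     res = 0
--     uniq = set()
--
--     for i in range(len(s)):
--         uniq.add(s[i])
--
--         if (i+1) % 3 == len(uniq):
--             res += 1
--         if len(uniq) > 2:
--             break
--
--     return res
-- ===== SOURCE B (Python) =====
-- def residuePrefixes(s: str) -> int:
--     # Closed-form: distinct count is 1 for prefix lengths 1..j and 2 for j+1..k,
--     # where j,k are the 1->2 and 2->3 distinct transitions; count residues arithmetically.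
--     n = len(s)
--     if n == 0:
--         return 0
--     c0 = s[0]
--     j = n
--     c1 = c0
--     for idx in range(n):
--         if s[idx] != c0:
--             j = idx
--             c1 = s[idx]
--             break
--     k = n
--     if j < n:
--         for idx in range(j + 1, n):
--             if s[idx] != c0 and s[idx] != c1:
--                 k = idx
--                 break
--     return (j + 2) // 3 + ((k + 1) // 3 - (j + 1) // 3)
-- ===== Notes on version B (the rewrite author's own statement) =====
-- stated objective: alternative
-- what changed: Replaces A's per-prefix seen-set maintenance and per-index residue test by locating the two distinct-count transition indices (1->2 and 2->3) and counting the qualifying prefix lengths with closed-form floor-division arithmetic.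
import Mathlib
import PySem

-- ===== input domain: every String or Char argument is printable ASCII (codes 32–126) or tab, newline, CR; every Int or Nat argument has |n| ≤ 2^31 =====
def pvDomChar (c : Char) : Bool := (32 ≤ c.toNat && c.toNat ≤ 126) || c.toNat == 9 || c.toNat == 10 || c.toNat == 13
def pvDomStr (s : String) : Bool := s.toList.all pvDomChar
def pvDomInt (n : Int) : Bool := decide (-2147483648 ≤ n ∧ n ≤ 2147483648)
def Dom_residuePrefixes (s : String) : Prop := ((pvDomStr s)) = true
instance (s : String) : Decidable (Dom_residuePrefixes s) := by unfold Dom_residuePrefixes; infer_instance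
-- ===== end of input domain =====

-- B replaces A's per-prefix set maintenance by locating the two distinct-count
-- transitions and counting the matching prefix lengths with closed-form division
-- (objective: alternative decomposition, constant-factor simpler work per char).

-- ===== PORT A =====
-- loop over the characters with index i, the set of seen chars, and the counter;
-- the 'break' becomes returning the accumulator early.
def residuePrefixesLoopA : List Char → Nat → PySem.Set Char → Int → Int
  | [], _, _, res => res
  | c :: cs, i, uniq, res =>
    let u := PySem.Set.add uniq c
    let r : Int := if (i + 1) % 3 = u.length then res + 1 else res
    if 2 < u.length then r else residuePrefixesLoopA cs (i + 1) u r

def residuePrefixes (s : String) : Int :=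
  residuePrefixesLoopA s.toList 0 PySem.Set.empty 0

-- ===== PORT B =====
-- first loop of B: index (relative) and value of the first char ≠ c0, if any
def findSecond : List Char → Char → Option (Nat × Char)
  | [], _ => none
  | c :: cs, a => if c ≠ a then some (0, c) else (findSecond cs a).map (fun p => (p.1 + 1, p.2))

-- second loop of B: relative index of the first char ∉ {a, b}, if any
def findThird : List Char → Char → Char → Option Nat
  | [], _, _ => none
  | c :: cs, a, b => if c ≠ a ∧ c ≠ b then some 0 else (findThird cs a b).map (· + 1)

def residuePrefixes_alt (s : String) : Int :=
  match s.toList with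
  | [] => 0
  | c0 :: rest =>
    let n : Nat := rest.length + 1
    let jk : Nat × Nat :=
      match findSecond (c0 :: rest) c0 with
      | none => (n, n)
      | some (j, c1) =>
        match findThird ((c0 :: rest).drop (j + 1)) c0 c1 with
        | none => (j, n)
        | some t => (j, j + 1 + t)
    PySem.Int.floordiv ((jk.1 : Int) + 2) 3 +
      (PySem.Int.floordiv ((jk.2 : Int) + 1) 3 - PySem.Int.floordiv ((jk.1 : Int) + 1) 3)

-- ===== PRECONDITION & SPEC =====
def Spec_residuePrefixes (s : String) (out : Int) : Prop := out = residuePrefixes_alt s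
instance (s : String) (out : Int) : Decidable (Spec_residuePrefixes s out) := by unfold Spec_residuePrefixes; infer_instance

-- ===== CLAIM (what is proved, stated in full; the proofs are below) =====
def Claim_equal_residuePrefixes : Prop := ∀ (s : String), Dom_residuePrefixes s → Spec_residuePrefixes s (residuePrefixes s)

-- ===== LEMMAS AND PROOFS =====

-- length of the all-{a,b} prefix of cs, phrased via findThird (B's scan)
def thirdLen (cs : List Char) (a b : Char) : Nat :=
  match findThird cs a b with
  | none => cs.length
  | some t => t

theorem thirdLen_nil (a b : Char) : thirdLen [] a b = 0 := rfl

theorem thirdLen_cons (c : Char) (cs : List Char) (a b : Char) :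
    thirdLen (c :: cs) a b = if c ≠ a ∧ c ≠ b then 0 else thirdLen cs a b + 1 := by
  by_cases h : c ≠ a ∧ c ≠ b
  · simp [thirdLen, findThird, h]
  · simp only [thirdLen, findThird, if_neg h]
    cases findThird cs a b <;> simp

-- (j, k) of B relative to cs: j = first index differing from a (else len),
-- k = first index with a third distinct char (else len)
def jkOf (cs : List Char) (a : Char) : Nat × Nat :=
  match findSecond cs a with
  | none => (cs.length, cs.length)
  | some (j, c1) => (j, j + 1 + thirdLen (cs.drop (j + 1)) a c1)

theorem jkOf_nil (a : Char) : jkOf [] a = (0, 0) := rfl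

theorem findSecond_cons_self (a : Char) (cs : List Char) :
    findSecond (a :: cs) a = (findSecond cs a).map (fun p => (p.1 + 1, p.2)) := by
  simp [findSecond]

theorem jkOf_cons_eq (a : Char) (cs : List Char) :
    jkOf (a :: cs) a = ((jkOf cs a).1 + 1, (jkOf cs a).2 + 1) := by
  simp only [jkOf, findSecond_cons_self]
  cases h : findSecond cs a with
  | none => simp
  | some p =>
    obtain ⟨j, c1⟩ := p
    simp only [Option.map_some, List.drop_succ_cons, Prod.mk.injEq, true_and]
    omega

theorem jkOf_cons_ne (a c : Char) (cs : List Char) (h : c ≠ a) :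
    jkOf (c :: cs) a = (0, 1 + thirdLen cs a c) := by
  simp [jkOf, findSecond, h]

theorem findSecond_lt (cs : List Char) (a : Char) :
    ∀ (j : Nat) (c1 : Char), findSecond cs a = some (j, c1) → j < cs.length := by
  induction cs with
  | nil => intro j c1 h; simp [findSecond] at h
  | cons c cs ih =>
    intro j c1 h
    by_cases hc : c ≠ a
    · simp [findSecond, hc] at h
      simp [← h.1]
    · rw [findSecond, if_neg hc] at h
      cases h2 : findSecond cs a with
      | none => rw [h2] at h; simp at h
      | some p =>
        obtain ⟨j', c1'⟩ := p
        rw [h2] at h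
        simp at h
        have := ih j' c1' h2
        simp only [List.length_cons]
        omega

-- the A-loop set stays the same when adding a member, grows otherwise
theorem set_add_mem (s : PySem.Set Char) (c : Char) (h : c ∈ s) :
    PySem.Set.add s c = s := by
  simp [PySem.Set.add, PySem.Set.contains, h]

theorem set_add_not_mem (s : PySem.Set Char) (c : Char) (h : c ∉ s) :
    PySem.Set.add s c = s ++ [c] := by
  simp [PySem.Set.add, PySem.Set.contains, h]

-- Phase 2: the seen-set is exactly {a, b}; A counts prefixes with residue 2 up to the 2→3 transition
theorem loopA_phase2 (a b : Char) :
    ∀ (cs : List Char) (i : Nat) (res : Int),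
      residuePrefixesLoopA cs i [a, b] res
        = res + (((i + thirdLen cs a b + 1) / 3 - (i + 1) / 3 : Nat) : Int) := by
  intro cs
  induction cs with
  | nil => intro i res; simp [residuePrefixesLoopA, thirdLen_nil]
  | cons c cs ih =>
    intro i res
    rw [thirdLen_cons]
    by_cases h : c ≠ a ∧ c ≠ b
    · -- third distinct char: checked (cannot fire, residues are < 3), then break
      have hmem : c ∉ ([a, b] : List Char) := by
        simp only [List.mem_cons, List.not_mem_nil]
        tauto
      simp only [residuePrefixesLoopA, set_add_not_mem _ _ hmem]
      have h3 : (i + 1) % 3 ≠ ([a, b] ++ [c] : List Char).length := by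
        simp; omega
      simp only [if_neg h3, if_pos (by simp : 2 < ([a, b] ++ [c] : List Char).length), if_pos h]
      omega
    · -- already-seen char: set unchanged, fire iff (i+1)%3 = 2
      have hmem : c ∈ ([a, b] : List Char) := by
        simp only [not_and_or, not_not] at h
        rcases h with h | h <;> simp [h]
      simp only [residuePrefixesLoopA, set_add_mem _ _ hmem, if_neg h]
      have hlen : ([a, b] : List Char).length = 2 := rfl
      rw [hlen]
      have hnb : ¬ (2 < 2) := by omega
      rw [if_neg hnb, ih (i + 1)]
      by_cases hf : (i + 1) % 3 = 2
      · rw [if_pos hf]; omega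
      · rw [if_neg hf]; omega

-- Phase 1: the seen-set is exactly {a}; closed-form count over both phases
theorem loopA_phase1 (a : Char) :
    ∀ (cs : List Char) (i : Nat) (res : Int),
      residuePrefixesLoopA cs i [a] res
        = res + (((i + (jkOf cs a).1 + 2) / 3 - (i + 2) / 3 : Nat) : Int)
              + (((i + (jkOf cs a).2 + 1) / 3 - (i + (jkOf cs a).1 + 1) / 3 : Nat) : Int) := by
  intro cs
  induction cs with
  | nil => intro i res; simp [residuePrefixesLoopA, jkOf_nil]
  | cons c cs ih =>
    intro i res
    by_cases h : c = a
    · subst h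
      rw [jkOf_cons_eq]
      have hmem : c ∈ ([c] : List Char) := by simp
      simp only [residuePrefixesLoopA, set_add_mem _ _ hmem]
      have hlen : ([c] : List Char).length = 1 := rfl
      rw [hlen]
      have hnb : ¬ (2 < 1) := by omega
      rw [if_neg hnb, ih (i + 1)]
      by_cases hf : (i + 1) % 3 = 1
      · rw [if_pos hf]; omega
      · rw [if_neg hf]; omega
    · rw [jkOf_cons_ne a c cs h]
      have hmem : c ∉ ([a] : List Char) := by simp [h]
      simp only [residuePrefixesLoopA, set_add_not_mem _ _ hmem, List.cons_append,
        List.nil_append]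
      have hlen : ([a, c] : List Char).length = 2 := rfl
      rw [hlen]
      have hnb : ¬ (2 < 2) := by omega
      rw [if_neg hnb, loopA_phase2 a c cs (i + 1)]
      by_cases hf : (i + 1) % 3 = 2
      · rw [if_pos hf]; omega
      · rw [if_neg hf]; omega

theorem jkOf_le (cs : List Char) (a : Char) :
    (jkOf cs a).1 ≤ (jkOf cs a).2 ∧ (jkOf cs a).2 ≤ cs.length := by
  induction cs with
  | nil => simp [jkOf_nil]
  | cons c cs ih =>
    by_cases h : c = a
    · subst h; rw [jkOf_cons_eq]; simpa using ⟨ih.1, by omega⟩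
    · rw [jkOf_cons_ne a c cs h]
      constructor
      · omega
      · have hth : thirdLen cs a c ≤ cs.length := by
          clear ih
          induction cs with
          | nil => simp [thirdLen_nil]
          | cons d ds ihd =>
            rw [thirdLen_cons]
            by_cases hd : d ≠ a ∧ d ≠ c
            · simp [hd]
            · simp only [if_neg hd, List.length_cons]
              omega
        simp only [List.length_cons]
        omega

-- ===== VERDICT (by name: the statement is the Claim_ definition above) =====
theorem residuePrefixes_spec : Claim_equal_residuePrefixes := by
  intro s _
  unfold Spec_residuePrefixes residuePrefixes residuePrefixes_alt
  cases hs : s.toList with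
  | nil => simp [residuePrefixesLoopA]
  | cons c0 rest =>
    -- first iteration of A: seen-set becomes {c0}, the length-1 prefix fires
    have hmem : c0 ∉ (PySem.Set.empty : PySem.Set Char) := by
      simp [PySem.Set.empty]
    simp only [residuePrefixesLoopA]
    rw [set_add_not_mem _ _ hmem]
    have hone : ((PySem.Set.empty : PySem.Set Char) ++ [c0]).length = 1 := by
      simp [PySem.Set.empty]
    rw [hone]
    have h01 : (0 + 1) % 3 = 1 := by norm_num
    rw [if_pos h01, if_neg (by omega : ¬ (2 < 1))]
    have hset : ((PySem.Set.empty : PySem.Set Char) ++ [c0]) = [c0] := by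
      simp [PySem.Set.empty]
    rw [hset, loopA_phase1 c0 rest (0 + 1) (0 + 1)]
    -- B's (j, k) on the full list are A's phase counters shifted by one
    have hJK : (match findSecond (c0 :: rest) c0 with
        | none => (rest.length + 1, rest.length + 1)
        | some (j, c1) =>
          match findThird ((c0 :: rest).drop (j + 1)) c0 c1 with
          | none => (j, rest.length + 1)
          | some t => (j, j + 1 + t)) = jkOf (c0 :: rest) c0 := by
      simp only [jkOf]
      cases h2 : findSecond (c0 :: rest) c0 with
      | none => simp
      | some p =>
        obtain ⟨j, c1⟩ := p
        have hj := findSecond_lt _ _ _ _ h2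
        simp only [thirdLen]
        cases h3 : findThird ((c0 :: rest).drop (j + 1)) c0 c1 with
        | none =>
          simp only [List.length_drop, List.length_cons, Prod.mk.injEq, true_and] at *
          omega
        | some t => rfl
    rw [hJK, jkOf_cons_eq c0 rest]
    have hle := jkOf_le rest c0
    set j := (jkOf rest c0).1
    set k := (jkOf rest c0).2
    -- closed-form arithmetic: A's shifted counts equal B's formula
    have e1 : PySem.Int.floordiv ((↑(j + 1) : Int) + 2) 3 = ((j + 3) / 3 : Nat) := by
      rw [(by push_cast; ring : ((↑(j + 1) : Int) + 2) = ((j + 3 : Nat) : Int))]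
      exact PySem.Int.floordiv_natCast _ _
    have e2 : PySem.Int.floordiv ((↑(k + 1) : Int) + 1) 3 = ((k + 2) / 3 : Nat) := by
      rw [(by push_cast; ring : ((↑(k + 1) : Int) + 1) = ((k + 2 : Nat) : Int))]
      exact PySem.Int.floordiv_natCast _ _
    have e3 : PySem.Int.floordiv ((↑(j + 1) : Int) + 1) 3 = ((j + 2) / 3 : Nat) := by
      rw [(by push_cast; ring : ((↑(j + 1) : Int) + 1) = ((j + 2 : Nat) : Int))]
      exact PySem.Int.floordiv_natCast _ _
    simp only [e1, e2, e3]
    omega
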